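-- pv_equiv track=rewrite | github.com/overbold/file_diff_analyzer | src/file_diff_analyzer/universal_analyzer.py | _get_universal_change_impact
-- ===== SOURCE A (Python) =====
-- from typing import List, Dict, Any, Optional
--
-- def _get_universal_change_impact(analysis: Dict[str, Any]) -> str:
--     impacts = [c.get("impact", "minor") for c in analysis["real_changes"]]
--     if "major" in impacts:
--         return "major"
--     elif "moderate" in impacts:
--         return "moderate"
--     else:
--         return "minor"
-- ===== SOURCE B (Python) =====
-- def _get_universal_change_impact(analysis):
--     rank = {"major": 2, "moderate": 1}
--     name = {2: "major", 1: "moderate"}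
--     m = max((rank.get(c.get("impact", "minor"), 0) for c in analysis["real_changes"]), default=0)
--     return name.get(m, "minor")
-- ===== Notes on version B (the rewrite author's own statement) =====
-- stated objective: simpler
-- what changed: Replaces building an impacts list plus two ordered membership scans with a single numeric pass: map each change's impact to a rank, take the max (default 0), translate back.
import Mathlib
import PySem

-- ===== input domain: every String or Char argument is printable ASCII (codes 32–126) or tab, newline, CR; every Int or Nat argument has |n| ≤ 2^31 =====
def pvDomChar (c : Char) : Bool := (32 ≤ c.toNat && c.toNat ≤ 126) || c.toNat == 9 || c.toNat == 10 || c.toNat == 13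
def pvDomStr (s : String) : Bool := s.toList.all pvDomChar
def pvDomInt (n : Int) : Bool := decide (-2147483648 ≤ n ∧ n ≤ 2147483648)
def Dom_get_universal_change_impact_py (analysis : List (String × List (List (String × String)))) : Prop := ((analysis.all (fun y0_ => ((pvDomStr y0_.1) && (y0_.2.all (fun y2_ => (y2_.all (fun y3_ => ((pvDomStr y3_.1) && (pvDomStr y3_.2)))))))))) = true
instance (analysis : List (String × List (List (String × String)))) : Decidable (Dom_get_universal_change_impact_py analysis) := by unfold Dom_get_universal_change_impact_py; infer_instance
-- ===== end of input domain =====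

-- B replaces A's impacts list plus two ordered membership scans by one numeric pass
-- (rank each impact, take the max, translate back); objective: simpler, same cost.

-- ===== PORT A =====
def get_universal_change_impact_py (analysis : List (String × List (List (String × String)))) : String :=
  let changes := ((PySem.Dict.mk analysis).get? "real_changes").getD []   -- analysis["real_changes"]; Pre_ below excludes the KeyError case
  let impacts := changes.map (fun c => (PySem.Dict.mk c).getD "impact" "minor")
  if impacts.contains "major" then "major"
  else if impacts.contains "moderate" then "moderate"
  else "minor"

-- ===== PORT B =====
def get_universal_change_impact_py_alt (analysis : List (String × List (List (String × String)))) : String :=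
  let rank : PySem.Dict String Int := PySem.Dict.mk [("major", 2), ("moderate", 1)]
  let name : PySem.Dict Int String := PySem.Dict.mk [(2, "major"), (1, "moderate")]
  let changes := ((PySem.Dict.mk analysis).get? "real_changes").getD []   -- analysis["real_changes"]; Pre_ below excludes the KeyError case
  let m := changes.foldl (fun acc c => max acc (rank.getD ((PySem.Dict.mk c).getD "impact" "minor") 0)) 0
  name.getD m "minor"

-- ===== PRECONDITION & SPEC =====
-- A (and B) raise KeyError when the "real_changes" key is absent; Pre_ excludes exactly those inputs.
def Pre_get_universal_change_impact_py (analysis : List (String × List (List (String × String)))) : Prop :=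
  (PySem.Dict.mk analysis).contains "real_changes" = true
instance (analysis : List (String × List (List (String × String)))) : Decidable (Pre_get_universal_change_impact_py analysis) := by unfold Pre_get_universal_change_impact_py; infer_instance

def pvWitness_get_universal_change_impact_py : (List (String × List (List (String × String)))) :=
  [("real_changes", [[("impact", "moderate")], []])]

def Spec_get_universal_change_impact_py (analysis : List (String × List (List (String × String)))) (out : String) : Prop := out = get_universal_change_impact_py_alt analysis
instance (analysis : List (String × List (List (String × String)))) (out : String) : Decidable (Spec_get_universal_change_impact_py analysis out) := by unfold Spec_get_universal_change_impact_py; infer_instance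

-- ===== CLAIM (what is proved, stated in full; the proofs are below) =====
def Claim_equal_get_universal_change_impact_py : Prop := ∀ (analysis : List (String × List (List (String × String)))), Dom_get_universal_change_impact_py analysis → Pre_get_universal_change_impact_py analysis → Spec_get_universal_change_impact_py analysis (get_universal_change_impact_py analysis)

-- ===== LEMMAS AND PROOFS =====

/-- B's rank of one impact string. -/
def pvRank (s : String) : Int :=
  (PySem.Dict.mk [("major", (2 : Int)), ("moderate", 1)]).getD s 0

theorem pvRank_of_ne (s : String) (h1 : s ≠ "major") (h2 : s ≠ "moderate") : pvRank s = 0 := by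
  have h1' : ("major" == s) = false := beq_eq_false_iff_ne.mpr (Ne.symm h1)
  have h2' : ("moderate" == s) = false := beq_eq_false_iff_ne.mpr (Ne.symm h2)
  simp [pvRank, PySem.Dict.getD, PySem.Dict.get?, List.find?, h1', h2']

theorem pvRank_nonneg (s : String) : 0 ≤ pvRank s := by
  by_cases h1 : s = "major"
  · subst h1; decide
  · by_cases h2 : s = "moderate"
    · subst h2; decide
    · rw [pvRank_of_ne s h1 h2]

/-- Folding max over a list with any start equals max of the start and the zero-started fold. -/
theorem foldl_max_start (l : List String) : ∀ a : Int, 0 ≤ a →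
    l.foldl (fun x s => max x (pvRank s)) a
      = max a (l.foldl (fun x s => max x (pvRank s)) 0) := by
  induction l with
  | nil => intro a ha; simp [max_eq_left ha]
  | cons s l ih =>
    intro a ha
    simp only [List.foldl_cons]
    rw [ih (max a (pvRank s)) (le_max_of_le_left ha), ih (max 0 (pvRank s)) (le_max_left 0 _)]
    rw [max_eq_right (pvRank_nonneg s)]
    exact (max_assoc a (pvRank s) _)

/-- Characterisation of B's numeric max in terms of A's membership tests. -/
theorem foldl_max_eq (l : List String) :
    l.foldl (fun x s => max x (pvRank s)) 0
      = if l.contains "major" then 2 else if l.contains "moderate" then 1 else 0 := by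
  induction l with
  | nil => simp
  | cons s l ih =>
    simp only [List.foldl_cons, List.contains_cons]
    rw [foldl_max_start l (max 0 (pvRank s)) (le_max_left 0 _), max_eq_right (pvRank_nonneg s), ih]
    by_cases hmaj : s = "major"
    · subst hmaj
      have hr : pvRank "major" = 2 := by decide
      rw [hr]
      simp only [beq_self_eq_true, Bool.true_or, if_true]
      split_ifs <;> decide
    · by_cases hmod : s = "moderate"
      · subst hmod
        have hr : pvRank "moderate" = 1 := by decide
        have hne : (("major" : String) == "moderate") = false := by decide
        rw [hr]
        simp only [hne, beq_self_eq_true, Bool.false_or, Bool.true_or]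
        split_ifs <;> decide
      · rw [pvRank_of_ne s hmaj hmod]
        have h1 : ("major" == s) = false := beq_eq_false_iff_ne.mpr (Ne.symm hmaj)
        have h2 : ("moderate" == s) = false := beq_eq_false_iff_ne.mpr (Ne.symm hmod)
        simp only [h1, h2, Bool.false_or]
        split_ifs <;> decide

-- ===== VERDICT (by name: the statement is the Claim_ definition above) =====
theorem get_universal_change_impact_py_spec : Claim_equal_get_universal_change_impact_py := by
  intro analysis _ _
  unfold Spec_get_universal_change_impact_py
  unfold get_universal_change_impact_py get_universal_change_impact_py_alt
  set changes := ((PySem.Dict.mk analysis).get? "real_changes").getD [] with hc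
  have hfold :
      changes.foldl (fun acc c =>
          max acc ((PySem.Dict.mk [("major", (2 : Int)), ("moderate", 1)]).getD
            ((PySem.Dict.mk c).getD "impact" "minor") 0)) 0
        = (changes.map (fun c => (PySem.Dict.mk c).getD "impact" "minor")).foldl
            (fun x s => max x (pvRank s)) 0 := by
    rw [List.foldl_map]; simp only [pvRank]
  simp only [hfold, foldl_max_eq]
  set l := changes.map (fun c => (PySem.Dict.mk c).getD "impact" "minor") with hl
  cases h1 : l.contains "major" <;> cases h2 : l.contains "moderate" <;>
    simp only [h1, h2, if_true, Bool.false_eq_true, if_false, reduceIte] <;> rfl
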